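-- pv_equiv track=rewrite | github.com/vishwa-patel11/fuse | common/utilities.py | get_consecutive
-- ===== SOURCE A (Python) =====
-- def get_consecutive(l, t, p, r):
--   if (p == 'fytd') & (r):
--     l = [x-1 for x in l]
--   if len(l) == 0:
--     return ''
--   l = sorted([x for x in set(l) if x < t])[::-1]
--   if len(l) == 0:
--     return ''
--   if l[0] != t-1:
--     return ''
--   c = []
--   for i in range(len(l)):
--     if i < len(l)-1:
--       if l[i] - l[i+1] == 1:
--         c.extend([l[i], l[i+1]])
--       else:
--         return str(len(set(c)))
--   ret = str(len(set(c)))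
-- ===== SOURCE B (Python) =====
-- def get_consecutive(l, t, p, r):
--   if p == 'fytd' and r:
--     l = [x - 1 for x in l]
--   if not l:
--     return ''
--   s = {x for x in l if x < t}
--   if t - 1 not in s:
--     return ''
--   run = 0
--   while t - 1 - run in s:
--     run += 1
--   return str(run)
-- ===== Notes on version B (the rewrite author's own statement) =====
-- stated objective: simpler
-- what changed: B drops A's sort-descending-then-scan-adjacent-pairs machinery (and the pair list c) entirely: it builds the set of values below t once and counts the consecutive run by probing membership of t-1, t-2, ... downward, returning str(run).
-- intended difference: On inputs where (after the fytd adjustment) the distinct values below t chain down from t-1 for exactly one value, A returns '0' (it counts an empty pair list), and where the chain covers ALL distinct values below t, A returns None (its loop falls off the end without hitting the return); B returns str(run), the intended length of the consecutive run, in both cases. — e.g. on get_consecutive([3, 1], 4, "", false): A returns some "0", B returns some "1"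
import Mathlib
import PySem

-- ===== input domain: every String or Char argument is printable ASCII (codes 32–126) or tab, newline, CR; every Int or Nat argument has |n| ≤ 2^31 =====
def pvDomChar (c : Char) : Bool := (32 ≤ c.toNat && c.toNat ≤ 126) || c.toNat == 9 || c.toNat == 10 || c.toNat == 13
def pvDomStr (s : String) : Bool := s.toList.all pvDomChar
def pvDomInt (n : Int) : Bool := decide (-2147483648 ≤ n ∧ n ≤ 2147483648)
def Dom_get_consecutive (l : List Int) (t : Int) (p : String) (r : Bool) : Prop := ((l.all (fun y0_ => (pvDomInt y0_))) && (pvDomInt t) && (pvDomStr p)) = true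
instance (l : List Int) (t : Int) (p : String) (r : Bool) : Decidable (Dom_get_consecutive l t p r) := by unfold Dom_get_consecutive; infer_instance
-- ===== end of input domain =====

-- B replaces A's sort-descending-and-scan with direct set probing for the run below t-1
-- and always returns str(run); A's '0' (run of one) and None (full run falls off the end)
-- outputs are stated as an intended difference (D_ below).

-- ===== PORT A =====
-- the 'for i in range(len(l))' loop with its early return; structural recursion on a fuel
-- counter that starts at l.length + 1, which is exact: i increases by 1 each iteration and the
-- loop exits as soon as i = l.length, so at most l.length + 1 steps ever run
def pvALoop (l : List Int) (c : List Int) (i : Nat) : Nat → Option String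
  | 0 => none
  | fuel + 1 =>
    if i < l.length then
      if i < l.length - 1 then
        if PySem.List.pyGetD l (i : Int) 0 - PySem.List.pyGetD l ((i : Int) + 1) 0 == 1 then
          pvALoop l (c ++ [PySem.List.pyGetD l (i : Int) 0, PySem.List.pyGetD l ((i : Int) + 1) 0]) (i + 1) fuel
        else some (PySem.Int.toStr ((PySem.Set.ofList c).length : Int))
      else pvALoop l c (i + 1) fuel
    else none

def get_consecutive (l : List Int) (t : Int) (p : String) (r : Bool) : Option String :=
  -- (p == 'fytd') & r  — bitwise & of two bools is their conjunction
  let l1 := if (p == "fytd") && r then l.map (fun x => x - 1) else l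
  if l1.length == 0 then some "" else
  -- sorted([x for x in set(l) if x < t])[::-1]; the set's hash iteration order is erased by sorted,
  -- and [::-1] on the sorted list is List.reverse (exact)
  let l2 := (PySem.List.sorted ((PySem.Set.ofList l1).filter (fun x => decide (x < t))) (fun x => x) false).reverse
  if l2.length == 0 then some "" else
  if !(PySem.List.pyGetD l2 0 0 == t - 1) then some "" else
  pvALoop l2 [] 0 (l2.length + 1)

-- ===== PORT B =====
-- 'while t - 1 - run in s: run += 1'; fuel s.length suffices exactly: each successful probe
-- hits a fresh element of the (duplicate-free) set s, so the loop exits within s.length steps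
def pvBProbe (s : List Int) (t : Int) (fuel : Nat) (run : Int) : Int :=
  match fuel with
  | 0 => run
  | f + 1 => if PySem.Set.contains s (t - 1 - run) then pvBProbe s t f (run + 1) else run

def get_consecutive_alt (l : List Int) (t : Int) (p : String) (r : Bool) : Option String :=
  let l1 := if (p == "fytd") && r then l.map (fun x => x - 1) else l
  if l1.length == 0 then some "" else
  let s : PySem.Set Int := PySem.Set.ofList (l1.filter (fun x => decide (x < t)))
  if !(PySem.Set.contains s (t - 1)) then some "" else
  some (PySem.Int.toStr (pvBProbe s t s.length 0))

-- ===== PRECONDITION & SPEC =====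
-- On inputs where, after the fytd adjustment, the distinct values below t chain down from t-1
-- for exactly one value, or the chain covers ALL distinct values below t, A returns '0'
-- (it counts an empty pair list) resp. None (the loop falls off the end), while B returns
-- str(run), the intended count of the consecutive run.
def D_get_consecutive (l : List Int) (t : Int) (p : String) (r : Bool) : Prop :=
  let d : Int := if p = "fytd" ∧ r = true then 1 else 0
  (t - 1 + d) ∈ l ∧ ((t - 2 + d) ∉ l ∨ ∀ x ∈ l, x < t + d → x = t - 1 + d ∨ x + 1 ∈ l)
instance (l : List Int) (t : Int) (p : String) (r : Bool) : Decidable (D_get_consecutive l t p r) := by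
  unfold D_get_consecutive; infer_instance

def Spec_get_consecutive (l : List Int) (t : Int) (p : String) (r : Bool) (out : Option String) : Prop :=
  ¬ D_get_consecutive l t p r → out = get_consecutive_alt l t p r
instance (l : List Int) (t : Int) (p : String) (r : Bool) (out : Option String) : Decidable (Spec_get_consecutive l t p r out) := by
  unfold Spec_get_consecutive; infer_instance

def pvDiffWitness_get_consecutive : List Int × Int × String × Bool := ([3, 1], 4, "", false)
def pvDiffWitnessOut_get_consecutive : (Option String) × (Option String) := (some "0", some "1")

-- ===== CLAIM (what is proved, stated in full; the proofs are below) =====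
def Claim_unchanged_get_consecutive : Prop := ∀ (l : List Int) (t : Int) (p : String) (r : Bool), Dom_get_consecutive l t p r → Spec_get_consecutive l t p r (get_consecutive l t p r)
def Claim_changed_get_consecutive : Prop := Dom_get_consecutive (pvDiffWitness_get_consecutive.1) (pvDiffWitness_get_consecutive.2.1) (pvDiffWitness_get_consecutive.2.2.1) (pvDiffWitness_get_consecutive.2.2.2) ∧ D_get_consecutive (pvDiffWitness_get_consecutive.1) (pvDiffWitness_get_consecutive.2.1) (pvDiffWitness_get_consecutive.2.2.1) (pvDiffWitness_get_consecutive.2.2.2) ∧ get_consecutive (pvDiffWitness_get_consecutive.1) (pvDiffWitness_get_consecutive.2.1) (pvDiffWitness_get_consecutive.2.2.1) (pvDiffWitness_get_consecutive.2.2.2) = pvDiffWitnessOut_get_consecutive.1 ∧ get_consecutive_alt (pvDiffWitness_get_consecutive.1) (pvDiffWitness_get_consecutive.2.1) (pvDiffWitness_get_consecutive.2.2.1) (pvDiffWitness_get_consecutive.2.2.2) = pvDiffWitnessOut_get_consecutive.2 ∧ pvDiffWitnessOut_get_consecutive.1 ≠ pvDiffWitnessOut_get_consecutive.2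
def Claim_exact_get_consecutive : Prop := ∀ (l : List Int) (t : Int) (p : String) (r : Bool), Dom_get_consecutive l t p r → D_get_consecutive l t p r → get_consecutive l t p r ≠ get_consecutive_alt l t p r


-- ===== LEMMAS AND PROOFS =====

-- proof-side abbreviations for the two derived collections: B's set and A's sorted-descending list
def pvS (l1 : List Int) (t : Int) : List Int :=
  PySem.Set.ofList (l1.filter (fun x => decide (x < t)))

def pvL (l1 : List Int) (t : Int) : List Int :=
  (PySem.List.sorted ((PySem.Set.ofList l1).filter (fun x => decide (x < t))) (fun x => x) false).reverse

-- the length of the consecutive run t-1, t-2, … inside S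
def pvRun (S : List Int) (t : Int) : Nat :=
  Nat.findGreatest (fun m => ∀ j, j < m → ((t - 1 - (j : Int)) ∈ S)) S.length

lemma mem_pvS (l1 : List Int) (t x : Int) : x ∈ pvS l1 t ↔ x ∈ l1 ∧ x < t := by
  simp [pvS, PySem.Set.mem_ofList, List.mem_filter]

lemma mem_pvL (l1 : List Int) (t x : Int) : x ∈ pvL l1 t ↔ x ∈ l1 ∧ x < t := by
  simp [pvL, PySem.List.mem_sorted, List.mem_filter, PySem.Set.mem_ofList]

lemma nodup_pvS (l1 : List Int) (t : Int) : (pvS l1 t).Nodup := PySem.Set.nodup_ofList _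

lemma nodup_pvL (l1 : List Int) (t : Int) : (pvL l1 t).Nodup := by
  rw [pvL, List.nodup_reverse]
  exact (PySem.List.sorted_perm _ _ _).nodup_iff.mpr ((PySem.Set.nodup_ofList _).filter _)

lemma len_pvL (l1 : List Int) (t : Int) : (pvL l1 t).length = (pvS l1 t).length := by
  have h : (pvL l1 t).Perm (pvS l1 t) := by
    rw [List.perm_ext_iff_of_nodup (nodup_pvL l1 t) (nodup_pvS l1 t)]
    intro a; rw [mem_pvL, mem_pvS]
  exact h.length_eq

lemma desc_pvL (l1 : List Int) (t : Int) : (pvL l1 t).Pairwise (fun a b => b < a) := by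
  have hnd : (PySem.List.sorted ((PySem.Set.ofList l1).filter (fun x => decide (x < t)))
      (fun x => x) false).Nodup :=
    (PySem.List.sorted_perm _ _ _).nodup_iff.mpr ((PySem.Set.nodup_ofList _).filter _)
  have hle := PySem.List.sorted_pairwise ((PySem.Set.ofList l1).filter (fun x => decide (x < t)))
      (fun x : Int => x)
  have hlt := (hle.and hnd).imp (fun h => lt_of_le_of_ne h.1 h.2)
  rw [pvL, List.pairwise_reverse]
  exact hlt

lemma pv_desc_le (L : List Int) (h : L.Pairwise (fun a b => b < a)) :
    ∀ i j, ∀ (hij : i ≤ j) (hj : j < L.length), L[j]'hj ≤ L[i]'(by omega) - ((j : Int) - (i : Int)) := by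
  have hg := List.pairwise_iff_getElem.mp h
  intro i j
  induction j with
  | zero =>
    intro hij hj
    have : i = 0 := by omega
    subst this; simp
  | succ j IH =>
    intro hij hj
    rcases Nat.lt_or_ge i (j + 1) with hlt | hge
    · have hj' : j < L.length := by omega
      have h1 := hg j (j + 1) hj' hj (by omega)
      have h2 := IH (by omega) hj'
      push_cast at h2 ⊢
      omega
    · have : i = j + 1 := by omega
      subst this; simp

lemma head_pvL (l1 : List Int) (t : Int) (hin : (t - 1) ∈ pvS l1 t) :
    ∀ (h0 : 0 < (pvL l1 t).length), (pvL l1 t)[0]'h0 = t - 1 := by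
  intro h0
  have hmem : (t - 1) ∈ pvL l1 t := by
    rw [mem_pvL]; rw [mem_pvS] at hin; exact hin
  obtain ⟨idx, hidx, hEq⟩ := List.mem_iff_getElem.mp hmem
  have hle := pv_desc_le (pvL l1 t) (desc_pvL l1 t) 0 idx (by omega) hidx
  rw [hEq] at hle
  have h0mem : (pvL l1 t)[0]'h0 ∈ pvL l1 t := List.getElem_mem _
  rw [mem_pvL] at h0mem
  push_cast at hle
  omega

lemma ne_nil_pvL (l1 : List Int) (t : Int) (hin : (t - 1) ∈ pvS l1 t) : pvL l1 t ≠ [] := by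
  have hmem : (t - 1) ∈ pvL l1 t := by
    rw [mem_pvL]; rw [mem_pvS] at hin; exact hin
  exact List.ne_nil_of_mem hmem

lemma pv_contains_iff (S : List Int) (x : Int) : PySem.Set.contains S x = true ↔ x ∈ S := by
  simp [PySem.Set.contains_eq_listContains]

lemma pvRun_le (S : List Int) (t : Int) : pvRun S t ≤ S.length := Nat.findGreatest_le _

lemma pvRun_mem (S : List Int) (t : Int) : ∀ j, j < pvRun S t → ((t - 1 - (j : Int)) ∈ S) :=
  Nat.findGreatest_spec (P := fun m => ∀ j, j < m → ((t - 1 - (j : Int)) ∈ S))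
    (Nat.zero_le S.length) (fun j hj => absurd hj (Nat.not_lt_zero j))

lemma pvRun_ge (S : List Int) (t : Int) (m : Nat) (hm : m ≤ S.length)
    (h : ∀ j, j < m → ((t - 1 - (j : Int)) ∈ S)) : m ≤ pvRun S t :=
  Nat.le_findGreatest hm h

lemma pvRun_notmem (S : List Int) (t : Int) (hnd : S.Nodup) :
    ((t - 1 - (pvRun S t : Int)) ∉ S) := by
  rcases Nat.lt_or_ge (pvRun S t) S.length with hlt | hge
  · have hnp := Nat.findGreatest_is_greatest (P := fun m => ∀ j, j < m → ((t - 1 - (j : Int)) ∈ S))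
      (Nat.lt_succ_self (pvRun S t)) hlt
    intro hmem
    apply hnp
    intro j hj
    rcases Nat.lt_or_ge j (pvRun S t) with h' | h'
    · exact pvRun_mem S t j h'
    · have hjeq : j = pvRun S t := by omega
      rw [hjeq]; exact hmem
  · -- run = |S| : S cannot also contain the extra value t-1-|S|
    have hrun : pvRun S t = S.length := le_antisymm (pvRun_le S t) hge
    rw [hrun]
    intro hmem
    have hinj : Function.Injective (fun j : Nat => t - 1 - (j : Int)) := by
      intro a b hab
      simp only at hab
      omega
    have hndm : ((List.range (S.length + 1)).map (fun j : Nat => t - 1 - (j : Int))).Nodup :=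
      List.Nodup.map hinj List.nodup_range
    have hsub : ((List.range (S.length + 1)).map (fun j : Nat => t - 1 - (j : Int))) ⊆ S := by
      intro x hx
      rw [List.mem_map] at hx
      obtain ⟨j, hj, rfl⟩ := hx
      rw [List.mem_range] at hj
      rcases Nat.lt_or_ge j S.length with h' | h'
      · exact pvRun_mem S t j (by omega)
      · have hjeq : j = S.length := by omega
        rw [hjeq]; exact hmem
    have hlen := (hndm.subperm hsub).length_le
    rw [List.length_map, List.length_range] at hlen
    omega

lemma pvBProbe_eq (S : List Int) (t : Int) (hnd : S.Nodup) :
    ∀ (f k : Nat), k ≤ pvRun S t → pvRun S t ≤ k + f →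
      pvBProbe S t f (k : Int) = (pvRun S t : Int) := by
  intro f
  induction f with
  | zero =>
    intro k h1 h2
    have hk : k = pvRun S t := by omega
    rw [hk, pvBProbe]
  | succ f IH =>
    intro k h1 h2
    rcases Nat.lt_or_ge k (pvRun S t) with hk | hk
    · have hm : ((t - 1 - (k : Int)) ∈ S) := pvRun_mem S t k hk
      have hc : PySem.Set.contains S (t - 1 - (k : Int)) = true := pv_contains_iff S _ |>.mpr hm
      rw [pvBProbe, if_pos hc]
      have hcast : (k : Int) + 1 = ((k + 1 : Nat) : Int) := by push_cast; ring
      rw [hcast]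
      exact IH (k + 1) (by omega) (by omega)
    · have hkeq : k = pvRun S t := by omega
      have hm : ¬ ((t - 1 - (k : Int)) ∈ S) := by rw [hkeq]; exact pvRun_notmem S t hnd
      have hc : ¬ (PySem.Set.contains S (t - 1 - (k : Int)) = true) := fun h =>
        hm ((pv_contains_iff S _).mp h)
      rw [pvBProbe, if_neg hc, hkeq]

lemma chain_pvL (l1 : List Int) (t : Int) (hin : (t - 1) ∈ pvS l1 t) :
    ∀ j, j < pvRun (pvS l1 t) t → ∀ (hj : j < (pvL l1 t).length),
      (pvL l1 t)[j]'hj = t - 1 - (j : Int) := by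
  intro j
  induction j using Nat.strong_induction_on with
  | _ j IH =>
    intro hjrun hj
    have h0 : 0 < (pvL l1 t).length := by omega
    have hhead := head_pvL l1 t hin h0
    have hle0 := pv_desc_le (pvL l1 t) (desc_pvL l1 t) 0 j (by omega) hj
    rw [hhead] at hle0
    have hmemS : (t - 1 - (j : Int)) ∈ pvS l1 t := pvRun_mem _ t j hjrun
    have hmemL : (t - 1 - (j : Int)) ∈ pvL l1 t := by
      rw [mem_pvL]; rw [mem_pvS] at hmemS; exact hmemS
    obtain ⟨idx, hidx, hEq⟩ := List.mem_iff_getElem.mp hmemL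
    have hge : j ≤ idx := by
      by_contra hc
      push_neg at hc
      have := IH idx hc (by omega) hidx
      rw [hEq] at this
      omega
    have hle1 := pv_desc_le (pvL l1 t) (desc_pvL l1 t) j idx hge hidx
    rw [hEq] at hle1
    push_cast at hle0 hle1 ⊢
    omega

lemma pv_get (L : List Int) (n : Nat) (h : n < L.length) :
    PySem.List.pyGetD L ((n : Nat) : Int) 0 = L[n]'h := by
  rw [PySem.List.pyGetD_natCast]
  exact List.getD_eq_getElem L 0 h

lemma pv_take_snoc (L : List Int) (n : Nat) (h : n < L.length) :
    L.take n ++ [L[n]'h] = L.take (n + 1) := by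
  rw [List.take_add_one, List.getElem?_eq_getElem h]
  rfl

-- A's loop returns none when every adjacent pair is consecutive (it falls off the end)
lemma pv_aloop_none (L : List Int)
    (hfull : ∀ j, ∀ (hj : j + 1 < L.length), L[j]'(by omega) - L[j + 1]'hj = 1) :
    ∀ fuel i c, L.length - i < fuel → pvALoop L c i fuel = none := by
  intro fuel
  induction fuel with
  | zero => intro i c h; omega
  | succ fuel IH =>
    intro i c h
    rw [pvALoop]
    by_cases hi : i < L.length
    · rw [if_pos hi]
      by_cases hi2 : i < L.length - 1
      · rw [if_pos hi2]
        have hj : i + 1 < L.length := by omega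
        have hcast : (i : Int) + 1 = ((i + 1 : Nat) : Int) := by push_cast; ring
        rw [pv_get L i hi, hcast, pv_get L (i + 1) hj, if_pos (by simp [hfull i hj])]
        exact IH (i + 1) _ (by omega)
      · rw [if_neg hi2]
        exact IH (i + 1) c (by omega)
    · rw [if_neg hi]

-- A's loop from position i ≥ 1, when the first gap sits at index run-1 < |L| - 1
lemma pv_aloop_mid (l1 : List Int) (t : Int) (hin : (t - 1) ∈ pvS l1 t)
    (h2 : 2 ≤ pvRun (pvS l1 t) t) (hlt : pvRun (pvS l1 t) t < (pvL l1 t).length) :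
    ∀ fuel i c, 1 ≤ i → i ≤ pvRun (pvS l1 t) t - 1 → pvRun (pvS l1 t) t - 1 - i < fuel →
      PySem.Set.ofList c = (pvL l1 t).take (i + 1) →
      pvALoop (pvL l1 t) c i fuel = some (PySem.Int.toStr ((pvRun (pvS l1 t) t : Nat) : Int)) := by
  set L := pvL l1 t with hL
  set run := pvRun (pvS l1 t) t with hrun
  intro fuel
  induction fuel with
  | zero => intro i c h1 h2' h3; omega
  | succ fuel IH =>
    intro i c h1 hile hfuel hc
    have hi : i < L.length := by omega
    have hj : i + 1 < L.length := by omega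
    have hi2 : i < L.length - 1 := by omega
    have hcast : (i : Int) + 1 = ((i + 1 : Nat) : Int) := by push_cast; ring
    have hchain := chain_pvL l1 t hin
    rw [pvALoop, if_pos hi, if_pos hi2, pv_get L i hi, hcast, pv_get L (i + 1) hj]
    rcases Nat.lt_or_ge i (run - 1) with hmid | hend
    · -- consecutive step
      have hv1 : L[i]'hi = t - 1 - (i : Int) := hchain i (by omega) hi
      have hv2 : L[i + 1]'hj = t - 1 - ((i + 1 : Nat) : Int) := hchain (i + 1) (by omega) hj
      have hdiff : L[i]'hi - L[i + 1]'hj = 1 := by rw [hv1, hv2]; push_cast; ring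
      rw [if_pos (by simp [hdiff])]
      apply IH (i + 1) _ (by omega) (by omega) (by omega)
      -- Set.ofList (c ++ [L[i], L[i+1]]) = take (i+2)
      have hmem1 : L[i]'hi ∈ PySem.Set.ofList c := by
        rw [hc, ← pv_take_snoc L i hi]
        exact List.mem_append_right _ (List.mem_singleton_self _)
      have hmem2 : L[i + 1]'hj ∉ PySem.Set.ofList c := by
        rw [hc]
        intro hmem
        obtain ⟨k, hk, hkEq⟩ := List.mem_iff_getElem.mp hmem
        have hklen : k < i + 1 := by
          have := List.length_take_le (i + 1) L
          have h' : (L.take (i + 1)).length = i + 1 := by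
            rw [List.length_take]; omega
          omega
        have hk' : k < L.length := by omega
        rw [List.getElem_take] at hkEq
        have := (nodup_pvL l1 t).getElem_inj_iff.mp hkEq
        omega
      calc PySem.Set.ofList (c ++ [L[i]'hi, L[i + 1]'hj])
          = PySem.Set.add (PySem.Set.add (PySem.Set.ofList c) (L[i]'hi)) (L[i + 1]'hj) := by
            rw [show [L[i]'hi, L[i + 1]'hj] = [L[i]'hi] ++ [L[i + 1]'hj] from rfl,
              ← List.append_assoc, PySem.Set.ofList_append_singleton,
              PySem.Set.ofList_append_singleton]
        _ = (PySem.Set.ofList c) ++ [L[i + 1]'hj] := by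
            rw [PySem.Set.add_of_mem hmem1, PySem.Set.add_of_not_mem hmem2]
        _ = L.take (i + 1 + 1) := by rw [hc, pv_take_snoc L (i + 1) hj]
    · -- the gap: i = run - 1
      have hieq : i = run - 1 := by omega
      have hv1 : L[i]'hi = t - 1 - (i : Int) := hchain i (by omega) hi
      have hnm : (t - 1 - (run : Int)) ∉ pvS l1 t := pvRun_notmem _ t (nodup_pvS l1 t)
      have hdiff : L[i]'hi - L[i + 1]'hj ≠ 1 := by
        intro hEq
        have hv2 : L[i + 1]'hj = t - 1 - (run : Int) := by
          rw [hv1] at hEq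
          have hiI : (i : Int) = (run : Int) - 1 := by omega
          omega
        have hmemL : L[i + 1]'hj ∈ pvL l1 t := List.getElem_mem _
        have hmemS : L[i + 1]'hj ∈ pvS l1 t := by
          rw [mem_pvS]
          exact (mem_pvL l1 t _).mp hmemL
        rw [hv2] at hmemS
        exact hnm hmemS
      rw [if_neg (by simp [hdiff])]
      congr 1
      have hclen : (PySem.Set.ofList c).length = run := by
        rw [hc, List.length_take]
        omega
      rw [hclen]

-- A's full computation in the generic (¬ D) case
lemma pv_A_run (l1 : List Int) (t : Int) (hin : (t - 1) ∈ pvS l1 t)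
    (h2 : 2 ≤ pvRun (pvS l1 t) t) (hlt : pvRun (pvS l1 t) t < (pvL l1 t).length) :
    pvALoop (pvL l1 t) [] 0 ((pvL l1 t).length + 1) =
      some (PySem.Int.toStr ((pvRun (pvS l1 t) t : Nat) : Int)) := by
  set L := pvL l1 t with hL
  set run := pvRun (pvS l1 t) t with hrun
  have hi : 0 < L.length := by omega
  have hj : 1 < L.length := by omega
  have hchain := chain_pvL l1 t hin
  have hv0 : L[0]'hi = t - 1 - ((0 : Nat) : Int) := hchain 0 (by omega) hi
  have hv1 : L[1]'hj = t - 1 - ((1 : Nat) : Int) := hchain 1 (by omega) hj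
  have hcast : ((0 : Nat) : Int) + 1 = ((1 : Nat) : Int) := by norm_num
  have hd01 : L[0]'hi - L[1]'hj = 1 := by rw [hv0, hv1]; push_cast; ring
  rw [pvALoop, if_pos hi, if_pos (by omega), pv_get L 0 hi, hcast, pv_get L 1 hj,
    if_pos (by simp [hd01])]
  apply pv_aloop_mid l1 t hin h2 hlt L.length 1 _ (by omega) (by omega) (by omega)
  have hne : L[0]'hi ≠ L[1]'hj := by rw [hv0, hv1]; push_cast; omega
  have hself : PySem.Set.ofList [L[0]'hi, L[1]'hj] = [L[0]'hi, L[1]'hj] :=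
    PySem.Set.ofList_eq_self_of_nodup _ (by simp [hne])
  rw [List.nil_append, hself, ← pv_take_snoc L 1 hj, ← pv_take_snoc L 0 hi]
  simp

lemma pv_B_val (l1 : List Int) (t : Int) :
    pvBProbe (pvS l1 t) t (pvS l1 t).length 0 = ((pvRun (pvS l1 t) t : Nat) : Int) := by
  have h := pvBProbe_eq (pvS l1 t) t (nodup_pvS l1 t) (pvS l1 t).length 0 (by omega)
    (by have := pvRun_le (pvS l1 t) t; omega)
  simpa using h

lemma pvRun_pos (l1 : List Int) (t : Int) (hin : (t - 1) ∈ pvS l1 t) :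
    1 ≤ pvRun (pvS l1 t) t := by
  apply pvRun_ge _ t 1 (by have := List.length_pos_of_mem hin; omega)
  intro j hj
  have hj0 : j = 0 := by omega
  rw [hj0]
  simpa using hin

lemma pvRun_two (l1 : List Int) (t : Int) (hin : (t - 1) ∈ pvS l1 t)
    (hin2 : (t - 2) ∈ pvS l1 t) : 2 ≤ pvRun (pvS l1 t) t := by
  apply pvRun_ge _ t 2
  · have hsub : [t - 1, t - 2] ⊆ pvS l1 t := by
      intro x hx; simp at hx; rcases hx with rfl | rfl <;> assumption
    have hnd : ([t - 1, t - 2] : List Int).Nodup := by simp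
    have := (hnd.subperm hsub).length_le
    simpa using this
  · intro j hj
    interval_cases j
    · simpa using hin
    · have hcast : t - 1 - ((1 : Nat) : Int) = t - 2 := by push_cast; ring
      rw [hcast]; exact hin2

lemma pvRun_lt_of_exists (l1 : List Int) (t : Int) (hin : (t - 1) ∈ pvS l1 t)
    (hx : ∃ x ∈ pvS l1 t, x < t - ((pvS l1 t).length : Int)) :
    pvRun (pvS l1 t) t < (pvS l1 t).length := by
  rcases Nat.lt_or_ge (pvRun (pvS l1 t) t) (pvS l1 t).length with h | h
  · exact h
  · exfalso
    have hrun : pvRun (pvS l1 t) t = (pvS l1 t).length := le_antisymm (pvRun_le _ t) h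
    obtain ⟨x, hxS, hxlt⟩ := hx
    have hxL : x ∈ pvL l1 t := by rw [mem_pvL, ← mem_pvS]; exact hxS
    obtain ⟨j, hjlen, hEq⟩ := List.mem_iff_getElem.mp hxL
    have hjS : j < (pvS l1 t).length := by rw [← len_pvL]; omega
    have := chain_pvL l1 t hin j (by omega) hjlen
    rw [hEq] at this
    omega

lemma pvRun_full (l1 : List Int) (t : Int) (hin : (t - 1) ∈ pvS l1 t)
    (hall : ∀ x ∈ pvS l1 t, t - ((pvS l1 t).length : Int) ≤ x) :
    pvRun (pvS l1 t) t = (pvS l1 t).length := by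
  set S := pvS l1 t with hS
  refine le_antisymm (pvRun_le S t) (pvRun_ge S t S.length (le_refl _) ?_)
  -- S is a nodup subset of the integer interval [t-|S|, t-1] of size |S|: it IS that interval
  have hsub : S.toFinset ⊆ Finset.Icc (t - (S.length : Int)) (t - 1) := by
    intro x hx
    rw [List.mem_toFinset] at hx
    have h1 := hall x hx
    have h2 : x < t := ((mem_pvS l1 t x).mp hx).2
    rw [Finset.mem_Icc]
    omega
  have hcard : S.toFinset.card = S.length := List.toFinset_card_of_nodup (nodup_pvS l1 t)
  have hicc : (Finset.Icc (t - (S.length : Int)) (t - 1)).card = S.length := by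
    rw [Int.card_Icc]
    simp
  have hEqF : S.toFinset = Finset.Icc (t - (S.length : Int)) (t - 1) :=
    Finset.eq_of_subset_of_card_le hsub (by omega)
  intro j hj
  have hmem : (t - 1 - (j : Int)) ∈ S.toFinset := by
    rw [hEqF, Finset.mem_Icc]
    constructor
    · omega
    · omega
  rwa [List.mem_toFinset] at hmem

-- the common shape of both ports after the fytd adjustment, as one equation
lemma pv_main (l1 : List Int) (t : Int)
    (hnD : ¬(l1 ≠ [] ∧ (t - 1) ∈ pvS l1 t ∧
      ((t - 2) ∉ pvS l1 t ∨ ∀ x ∈ pvS l1 t, t - ((pvS l1 t).length : Int) ≤ x))) :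
    (if l1.length == 0 then some "" else
      if (pvL l1 t).length == 0 then some "" else
      if !(PySem.List.pyGetD (pvL l1 t) 0 0 == t - 1) then some "" else
      pvALoop (pvL l1 t) [] 0 ((pvL l1 t).length + 1)) =
    (if l1.length == 0 then some "" else
      if !(PySem.Set.contains (pvS l1 t) (t - 1)) then some "" else
      some (PySem.Int.toStr (pvBProbe (pvS l1 t) t (pvS l1 t).length 0))) := by
  by_cases hnil : (l1.length == 0) = true
  · rw [if_pos hnil, if_pos hnil]
  · rw [if_neg hnil, if_neg hnil]
    have hne : l1 ≠ [] := by simpa using hnil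
    by_cases hin : (t - 1) ∈ pvS l1 t
    · -- main case: the head guard passes on both sides
      have hLne := ne_nil_pvL l1 t hin
      have h0 : 0 < (pvL l1 t).length := List.length_pos_of_ne_nil hLne
      have hhead := head_pvL l1 t hin h0
      have hget : PySem.List.pyGetD (pvL l1 t) 0 0 = (pvL l1 t)[0]'h0 :=
        pv_get (pvL l1 t) 0 h0
      rw [if_neg (by simpa using h0.ne'), if_neg (by rw [hget, hhead]; simp),
        if_neg (by simp; exact hin)]
      -- ¬ D together with the guards: t-2 present and the chain does not exhaust S
      by_cases h2m : (t - 2) ∈ pvS l1 t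
      · by_cases hallm : ∀ x ∈ pvS l1 t, t - ((pvS l1 t).length : Int) ≤ x
        · exact absurd ⟨hne, hin, Or.inr hallm⟩ hnD
        · push_neg at hallm
          have h2 := pvRun_two l1 t hin h2m
          have hlt : pvRun (pvS l1 t) t < (pvL l1 t).length := by
            rw [len_pvL]
            exact pvRun_lt_of_exists l1 t hin hallm
          rw [pv_A_run l1 t hin h2 hlt, pv_B_val l1 t]
      · exact absurd ⟨hne, hin, Or.inl h2m⟩ hnD
    · -- t-1 absent: both sides return ''
      have hBc : (!(PySem.Set.contains (pvS l1 t) (t - 1))) = true := by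
        simp only [Bool.not_eq_true']
        rw [← Bool.not_eq_true]
        exact fun h => hin ((pv_contains_iff (pvS l1 t) (t-1)).mp h)
      rw [if_pos hBc]
      by_cases hLnil : ((pvL l1 t).length == 0) = true
      · rw [if_pos hLnil]
      · rw [if_neg hLnil]
        have h0 : 0 < (pvL l1 t).length := by rw [beq_iff_eq] at hLnil; omega
        have hgetne : PySem.List.pyGetD (pvL l1 t) 0 0 ≠ t - 1 := by
          have hg0 : PySem.List.pyGetD (pvL l1 t) 0 0 = (pvL l1 t)[0]'h0 :=
            pv_get (pvL l1 t) 0 h0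
          rw [hg0]
          intro hEq
          apply hin
          rw [← hEq, mem_pvS]
          exact (mem_pvL l1 t _).mp (List.getElem_mem _)
        rw [if_pos (by simpa using hgetne)]

-- the tight direction: inside D_ A and B always disagree
lemma pv_main_tight (l1 : List Int) (t : Int)
    (hD : l1 ≠ [] ∧ (t - 1) ∈ pvS l1 t ∧
      ((t - 2) ∉ pvS l1 t ∨ ∀ x ∈ pvS l1 t, t - ((pvS l1 t).length : Int) ≤ x)) :
    (if l1.length == 0 then some "" else
      if (pvL l1 t).length == 0 then some "" else
      if !(PySem.List.pyGetD (pvL l1 t) 0 0 == t - 1) then some "" else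
      pvALoop (pvL l1 t) [] 0 ((pvL l1 t).length + 1)) ≠
    (if l1.length == 0 then some "" else
      if !(PySem.Set.contains (pvS l1 t) (t - 1)) then some "" else
      some (PySem.Int.toStr (pvBProbe (pvS l1 t) t (pvS l1 t).length 0))) := by
  obtain ⟨hne, hin, hcase⟩ := hD
  have hnil : ¬((l1.length == 0) = true) := by simpa using hne
  have hLne := ne_nil_pvL l1 t hin
  have h0 : 0 < (pvL l1 t).length := List.length_pos_of_ne_nil hLne
  have hhead := head_pvL l1 t hin h0
  have hget : PySem.List.pyGetD (pvL l1 t) 0 0 = (pvL l1 t)[0]'h0 := pv_get (pvL l1 t) 0 h0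
  rw [if_neg hnil, if_neg hnil, if_neg (by simpa using h0.ne'),
    if_neg (by rw [hget, hhead]; simp), if_neg (by simp; exact hin),
    pv_B_val l1 t]
  have hchain := chain_pvL l1 t hin
  rcases hcase with hnot2 | hall
  · -- run = 1 : A returns '0' (if the list goes on) or none (single element); B returns '1'
    have hrun1 : pvRun (pvS l1 t) t = 1 := by
      have hge := pvRun_pos l1 t hin
      rcases Nat.lt_or_ge (pvRun (pvS l1 t) t) 2 with h | h
      · omega
      · exfalso
        apply hnot2
        have hm := pvRun_mem (pvS l1 t) t 1 (by omega)
        have hcast : t - 1 - ((1 : Nat) : Int) = t - 2 := by push_cast; ring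
        rwa [hcast] at hm
    rw [hrun1]
    rcases Nat.lt_or_ge 1 (pvL l1 t).length with hlen2 | hlen1
    · -- at least two elements: A hits the gap at i = 0 and returns '0'
      have hcast : ((0 : Nat) : Int) + 1 = ((1 : Nat) : Int) := by norm_num
      have hdiff : (pvL l1 t)[0]'h0 - (pvL l1 t)[1]'hlen2 ≠ 1 := by
        intro hEq
        apply hnot2
        have h1 : (pvL l1 t)[1]'hlen2 = t - 2 := by rw [hhead] at hEq; omega
        have hm : (pvL l1 t)[1]'hlen2 ∈ pvL l1 t := List.getElem_mem _
        rw [h1] at hm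
        rw [mem_pvS]
        exact (mem_pvL l1 t _).mp hm
      rw [pvALoop, if_pos h0, if_pos (by omega), pv_get (pvL l1 t) 0 h0, hcast,
        pv_get (pvL l1 t) 1 hlen2, if_neg (by simp [hdiff])]
      decide
    · -- exactly one element: A falls off the end and returns none
      have hfull : ∀ j, ∀ (hj : j + 1 < (pvL l1 t).length),
          (pvL l1 t)[j]'(by omega) - (pvL l1 t)[j + 1]'hj = 1 := by
        intro j hj; exact absurd hj (by omega)
      rw [pv_aloop_none (pvL l1 t) hfull ((pvL l1 t).length + 1) 0 [] (by omega)]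
      simp
  · -- full run : A falls off the end and returns none; B returns str(|S|)
    have hrun : pvRun (pvS l1 t) t = (pvS l1 t).length := pvRun_full l1 t hin hall
    have hfull : ∀ j, ∀ (hj : j + 1 < (pvL l1 t).length),
        (pvL l1 t)[j]'(by omega) - (pvL l1 t)[j + 1]'hj = 1 := by
      intro j hj
      have hlen := len_pvL l1 t
      have hv1 := hchain j (by rw [hrun, ← hlen]; omega) (by omega)
      have hv2 := hchain (j + 1) (by rw [hrun, ← hlen]; omega) hj
      rw [hv1, hv2]
      push_cast
      ring
    rw [pv_aloop_none (pvL l1 t) hfull ((pvL l1 t).length + 1) 0 [] (by omega)]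
    simp

-- D_ (a condition on the raw input: shift d, membership, distinct-count) restated in the
-- adjusted-list form the main lemmas use
-- upward closure of pvS ("every member is t-1 or has its successor in the set") is the same
-- as the min-bound form used by the main lemmas
lemma pv_chain_up (l1 : List Int) (t : Int)
    (hcl : ∀ y ∈ pvS l1 t, y = t - 1 ∨ (y + 1) ∈ pvS l1 t) (y : Int) (hy : y ∈ pvS l1 t) :
    ∀ i : Nat, (i : Int) ≤ t - 1 - y → (y + (i : Int)) ∈ pvS l1 t := by
  intro i
  induction i with
  | zero => intro _; simpa using hy
  | succ i IH =>
    intro hle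
    have hle' : (i : Int) ≤ t - 1 - y := by push_cast at hle; omega
    have hmem := IH hle'
    rcases hcl _ hmem with he | hs
    · exfalso; push_cast at hle; omega
    · have hcast : y + ((i + 1 : Nat) : Int) = y + (i : Int) + 1 := by push_cast; ring
      rw [hcast]; exact hs

lemma pv_closed_min (l1 : List Int) (t : Int)
    (hcl : ∀ y ∈ pvS l1 t, y = t - 1 ∨ (y + 1) ∈ pvS l1 t) :
    ∀ y ∈ pvS l1 t, t - ((pvS l1 t).length : Int) ≤ y := by
  intro y hy
  by_contra hlt
  push_neg at hlt
  have hall : ∀ i : Nat, i ≤ (pvS l1 t).length → (y + (i : Int)) ∈ pvS l1 t := by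
    intro i hi
    apply pv_chain_up l1 t hcl y hy
    have : ((pvS l1 t).length : Int) ≤ t - 1 - y := by omega
    have hc : (i : Int) ≤ ((pvS l1 t).length : Int) := by exact_mod_cast hi
    omega
  have hinj : Function.Injective (fun i : Nat => y + (i : Int)) := by
    intro a b hab
    simp only at hab
    omega
  have hndm : ((List.range ((pvS l1 t).length + 1)).map (fun i : Nat => y + (i : Int))).Nodup :=
    List.Nodup.map hinj List.nodup_range
  have hsub : ((List.range ((pvS l1 t).length + 1)).map (fun i : Nat => y + (i : Int))) ⊆ pvS l1 t := by
    intro x hx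
    rw [List.mem_map] at hx
    obtain ⟨i, hi, rfl⟩ := hx
    rw [List.mem_range] at hi
    exact hall i (by omega)
  have hlen := (hndm.subperm hsub).length_le
  rw [List.length_map, List.length_range] at hlen
  omega

lemma pv_min_closed (l1 : List Int) (t : Int) (hin : (t - 1) ∈ pvS l1 t)
    (hall : ∀ y ∈ pvS l1 t, t - ((pvS l1 t).length : Int) ≤ y) :
    ∀ y ∈ pvS l1 t, y = t - 1 ∨ (y + 1) ∈ pvS l1 t := by
  intro y hy
  have hrun := pvRun_full l1 t hin hall
  have hyL : y ∈ pvL l1 t := by rw [mem_pvL, ← mem_pvS]; exact hy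
  obtain ⟨j, hj, hEq⟩ := List.mem_iff_getElem.mp hyL
  have hchain := chain_pvL l1 t hin
  have hv := hchain j (by rw [hrun, ← len_pvL]; omega) hj
  rcases Nat.eq_zero_or_pos j with h0 | hpos
  · left
    rw [← hEq, hv, h0]
    norm_num
  · right
    have hj' : j - 1 < (pvL l1 t).length := by omega
    have hv' := hchain (j - 1) (by rw [hrun, ← len_pvL]; omega) hj'
    have hy1 : y + 1 = (pvL l1 t)[j - 1]'hj' := by
      rw [hv', ← hEq, hv]
      have : ((j - 1 : Nat) : Int) = (j : Int) - 1 := by omega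
      rw [this]; ring
    rw [hy1, mem_pvS]
    exact (mem_pvL l1 t _).mp (List.getElem_mem _)

-- D_ (a short condition on the raw input: shift d, membership, successor closure) restated in
-- the adjusted-list form the main lemmas use
lemma pv_D_iff (l : List Int) (t : Int) (p : String) (r : Bool) :
    D_get_consecutive l t p r ↔
      ((if (p == "fytd") && r then l.map (fun x => x - 1) else l) ≠ [] ∧
       (t - 1) ∈ pvS (if (p == "fytd") && r then l.map (fun x => x - 1) else l) t ∧
       ((t - 2) ∉ pvS (if (p == "fytd") && r then l.map (fun x => x - 1) else l) t ∨
        ∀ x ∈ pvS (if (p == "fytd") && r then l.map (fun x => x - 1) else l) t,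
          t - ((pvS (if (p == "fytd") && r then l.map (fun x => x - 1) else l) t).length : Int) ≤ x)) := by
  simp only [D_get_consecutive]
  by_cases hb : ((p == "fytd") && r) = true
  · have hprop : p = "fytd" ∧ r = true := by
      simpa [Bool.and_eq_true, beq_iff_eq] using hb
    rw [if_pos hb, if_pos hprop]
    have h2 : (t - 1) ∈ pvS (l.map (fun x => x - 1)) t ↔ (t - 1 + 1) ∈ l := by
      rw [mem_pvS]
      constructor
      · rintro ⟨hm, -⟩
        obtain ⟨a, ha, he⟩ := List.mem_map.mp hm
        have hae : a = t - 1 + 1 := by omega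
        rwa [hae] at ha
      · intro h
        exact ⟨List.mem_map.mpr ⟨t - 1 + 1, h, by ring⟩, by omega⟩
    have h3 : (t - 2) ∈ pvS (l.map (fun x => x - 1)) t ↔ (t - 2 + 1) ∈ l := by
      rw [mem_pvS]
      constructor
      · rintro ⟨hm, -⟩
        obtain ⟨a, ha, he⟩ := List.mem_map.mp hm
        have hae : a = t - 2 + 1 := by omega
        rwa [hae] at ha
      · intro h
        exact ⟨List.mem_map.mpr ⟨t - 2 + 1, h, by ring⟩, by omega⟩
    have hC : (∀ x ∈ l, x < t + 1 → x = t - 1 + 1 ∨ x + 1 ∈ l) ↔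
        (∀ y ∈ pvS (l.map (fun x => x - 1)) t, y = t - 1 ∨ (y + 1) ∈ pvS (l.map (fun x => x - 1)) t) := by
      constructor
      · intro H y hy
        rw [mem_pvS] at hy
        obtain ⟨hm, hlt⟩ := hy
        obtain ⟨x, hx, he⟩ := List.mem_map.mp hm
        by_cases hye : y = t - 1
        · exact Or.inl hye
        · rcases H x hx (by omega) with he' | hs
          · exact Or.inl (by omega)
          · right
            rw [mem_pvS]
            exact ⟨List.mem_map.mpr ⟨x + 1, hs, by omega⟩, by omega⟩
      · intro H x hx hxlt
        by_cases hxe : x = t - 1 + 1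
        · exact Or.inl hxe
        · have hy : (x - 1) ∈ pvS (l.map (fun x => x - 1)) t := by
            rw [mem_pvS]
            exact ⟨List.mem_map.mpr ⟨x, hx, rfl⟩, by omega⟩
          rcases H _ hy with he | hs
          · exact Or.inl (by omega)
          · right
            rw [mem_pvS] at hs
            obtain ⟨hm, -⟩ := hs
            obtain ⟨a, ha, he⟩ := List.mem_map.mp hm
            have haa : a = x + 1 := by omega
            rwa [haa] at ha
    constructor
    · rintro ⟨hm, hor⟩
      have hm' := h2.mpr hm
      refine ⟨?_, hm', ?_⟩
      · rw [mem_pvS] at hm'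
        exact List.ne_nil_of_mem hm'.1
      · rcases hor with h | h
        · exact Or.inl (fun hc => h (h3.mp hc))
        · exact Or.inr (pv_closed_min _ t (hC.mp h))
    · rintro ⟨-, hm, hor⟩
      refine ⟨h2.mp hm, ?_⟩
      rcases hor with h | h
      · exact Or.inl (fun hc => h (h3.mpr hc))
      · exact Or.inr (hC.mpr (pv_min_closed _ t hm h))
  · have hnprop : ¬(p = "fytd" ∧ r = true) := by
      simpa [Bool.and_eq_true, beq_iff_eq] using hb
    rw [if_neg hb, if_neg hnprop]
    have h2 : (t - 1) ∈ pvS l t ↔ (t - 1 + 0) ∈ l := by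
      rw [mem_pvS, show t - 1 + (0 : Int) = t - 1 by ring]
      exact ⟨And.left, fun h => ⟨h, by omega⟩⟩
    have h3 : (t - 2) ∈ pvS l t ↔ (t - 2 + 0) ∈ l := by
      rw [mem_pvS, show t - 2 + (0 : Int) = t - 2 by ring]
      exact ⟨And.left, fun h => ⟨h, by omega⟩⟩
    have hC : (∀ x ∈ l, x < t + 0 → x = t - 1 + 0 ∨ x + 1 ∈ l) ↔
        (∀ y ∈ pvS l t, y = t - 1 ∨ (y + 1) ∈ pvS l t) := by
      constructor
      · intro H y hy
        rw [mem_pvS] at hy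
        by_cases hye : y = t - 1
        · exact Or.inl hye
        · rcases H y hy.1 (by omega) with he | hs
          · exact Or.inl (by omega)
          · exact Or.inr ((mem_pvS l t _).mpr ⟨hs, by omega⟩)
      · intro H x hx hxlt
        by_cases hxe : x = t - 1 + 0
        · exact Or.inl hxe
        · rcases H x ((mem_pvS l t x).mpr ⟨hx, by omega⟩) with he | hs
          · exact Or.inl (by omega)
          · exact Or.inr ((mem_pvS l t _).mp hs).1
    constructor
    · rintro ⟨hm, hor⟩
      have hm' := h2.mpr hm
      refine ⟨?_, hm', ?_⟩
      · rw [mem_pvS] at hm'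
        exact List.ne_nil_of_mem hm'.1
      · rcases hor with h | h
        · exact Or.inl (fun hc => h (h3.mp hc))
        · exact Or.inr (pv_closed_min _ t (hC.mp h))
    · rintro ⟨-, hm, hor⟩
      refine ⟨h2.mp hm, ?_⟩
      rcases hor with h | h
      · exact Or.inl (fun hc => h (h3.mpr hc))
      · exact Or.inr (hC.mpr (pv_min_closed _ t hm h))

-- ===== VERDICT (by name: the statement is the Claim_ definition above) =====
theorem get_consecutive_spec : Claim_unchanged_get_consecutive := by
  intro l t p r _dom
  unfold Spec_get_consecutive
  intro hnD
  unfold get_consecutive get_consecutive_alt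
  rw [pv_D_iff] at hnD
  exact pv_main (if (p == "fytd") && r then l.map (fun x => x - 1) else l) t hnD

theorem get_consecutive_changed : Claim_changed_get_consecutive := by unfold Claim_changed_get_consecutive; decide

theorem get_consecutive_tight : Claim_exact_get_consecutive := by
  intro l t p r _dom hD
  unfold get_consecutive get_consecutive_alt
  rw [pv_D_iff] at hD
  exact pv_main_tight (if (p == "fytd") && r then l.map (fun x => x - 1) else l) t hD
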